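-- pv_equiv track=rewrite | github.com/sgluss/Levenshtein | main.py | indexListByWordLength
-- ===== SOURCE A (Python) =====
-- def indexListByWordLength(list):
--     retVal = {}
--     for string in list:
--         length = len(string)
--         if length not in retVal:
--             retVal[length] = []
--         retVal[length] += [string]
--     return retVal
-- ===== SOURCE B (Python) =====
-- def indexListByWordLength(list):
--     # Two-pass: first collect the distinct lengths in first-occurrence order,
--     # then build each bucket with a filter over the input.
--     keys = dict.fromkeys(len(s) for s in list)
--     return {L: [s for s in list if len(s) == L] for L in keys}
-- ===== Notes on version B (the rewrite author's own statement) =====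
-- stated objective: idiomatic
-- what changed: B replaces A's bucket-on-the-fly dict accumulation by a two-pass comprehension: dedup the lengths once (dict.fromkeys), then build each bucket with a per-key filter of the input.
import Mathlib
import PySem

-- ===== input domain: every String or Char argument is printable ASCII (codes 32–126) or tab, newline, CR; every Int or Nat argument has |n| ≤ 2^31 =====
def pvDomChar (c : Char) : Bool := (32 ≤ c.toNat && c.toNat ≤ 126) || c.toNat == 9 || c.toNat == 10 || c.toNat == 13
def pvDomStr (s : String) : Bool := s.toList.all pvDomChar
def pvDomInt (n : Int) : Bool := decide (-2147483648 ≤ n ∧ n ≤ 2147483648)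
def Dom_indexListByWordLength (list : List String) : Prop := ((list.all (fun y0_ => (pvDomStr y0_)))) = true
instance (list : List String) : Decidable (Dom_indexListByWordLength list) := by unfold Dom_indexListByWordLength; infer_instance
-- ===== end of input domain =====

-- B builds the same dict by a two-pass comprehension (dedup the lengths, then filter per key)
-- instead of A's bucket-on-the-fly accumulation; objective: idiomatic.

-- ===== PORT A =====
def indexListByWordLength (list : List String) : List (Int × List String) :=
  (list.foldl (fun retVal s =>
      let length : Int := PySem.Str.len s
      let retVal := if retVal.contains length then retVal else retVal.insert length []
      retVal.insert length (retVal.getD length [] ++ [s]))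
    (PySem.Dict.empty : PySem.Dict Int (List String))).items

-- ===== PORT B =====
def indexListByWordLength_alt (list : List String) : List (Int × List String) :=
  (PySem.List.dedup (list.map (fun s => PySem.Str.len s))).map
    (fun L => (L, list.filter (fun s => PySem.Str.len s == L)))

-- ===== PRECONDITION & SPEC =====
def Spec_indexListByWordLength (list : List String) (out : List (Int × List String)) : Prop := out = indexListByWordLength_alt list
instance (list : List String) (out : List (Int × List String)) : Decidable (Spec_indexListByWordLength list out) := by unfold Spec_indexListByWordLength; infer_instance

-- ===== CLAIM (what is proved, stated in full; the proofs are below) =====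
def Claim_equal_indexListByWordLength : Prop := ∀ (list : List String), Dom_indexListByWordLength list → Spec_indexListByWordLength list (indexListByWordLength list)

-- ===== LEMMAS AND PROOFS =====

-- A's loop body (setdefault-then-append) is exactly dict.modify with default [].
theorem pvStep_eq_modify (d : PySem.Dict Int (List String)) (k : Int) (s : String) :
    (let d' := if d.contains k then d else d.insert k []
     d'.insert k (d'.getD k [] ++ [s]))
    = d.modify k [] (· ++ [s]) := by
  by_cases h : d.contains k
  · simp [h, PySem.Dict.modify, PySem.Dict.getD_eq_get?_getD]
  · have h0 : d.get? k = none := by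
      rw [PySem.Dict.contains_eq_isSome_get?] at h
      simp only [Option.isSome_iff_exists] at h
      exact Option.eq_none_iff_forall_ne_some.mpr (by simpa using h)
    simp [h, h0, PySem.Dict.modify, PySem.Dict.insert_insert_self,
      PySem.Dict.getD_eq_get?_getD]

theorem indexListByWordLength_spec : Claim_equal_indexListByWordLength := by
  intro list _
  unfold Spec_indexListByWordLength indexListByWordLength indexListByWordLength_alt
  simp only [pvStep_eq_modify]
  have hfold :
      (list.foldl (fun (d : PySem.Dict Int (List String)) s =>
          d.modify (PySem.Str.len s) [] (· ++ [s])) PySem.Dict.empty)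
      = ((list.map (fun s => ((PySem.Str.len s : Int), s))).foldl
          (fun (d : PySem.Dict Int (List String)) p => d.modify p.1 [] (· ++ [p.2]))
          PySem.Dict.empty) := by
    rw [List.foldl_map]
  rw [hfold]
  set pairs := list.map (fun s => ((PySem.Str.len s : Int), s)) with hpairs
  set D := pairs.foldl (fun (d : PySem.Dict Int (List String)) p =>
      d.modify p.1 [] (· ++ [p.2])) PySem.Dict.empty with hD
  have hnd : D.keys.Nodup := by
    rw [hD]
    exact PySem.Dict.nodup_keys_foldl_modify_key pairs Prod.fst []
      (fun _ p => (· ++ [p.2])) PySem.Dict.empty (by simp)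
  rw [PySem.Dict.items_eq_map_keys D hnd []]
  have hkeys : D.keys = PySem.List.dedup (list.map (fun s => (PySem.Str.len s : Int))) := by
    rw [hD, PySem.Dict.keys_foldl_modify_key]
    simp [hpairs, List.map_map, PySem.Set.update_nil_left, Function.comp_def]
  have hget : ∀ L : Int, D.getD L [] = list.filter (fun s => PySem.Str.len s == L) := by
    intro L
    rw [hD, PySem.Dict.getD_foldl_modify_append]
    simp [hpairs, List.filter_map, Function.comp_def]
  rw [hkeys]
  exact List.map_congr_left (fun L _ => by rw [hget L])
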